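-- pv_equiv track=rewrite | github.com/Amperstrand/Bolty | tests/test_bolt11_decode.py | bolt11_parse_amount
-- ===== SOURCE A (Python) =====
-- def bolt11_parse_amount(s):
--     if not s:
--         return 0
--     raw = 0
--     i = 0
--     while i < len(s) and s[i].isdigit():
--         raw = raw * 10 + int(s[i])
--         i += 1
--     if i < len(s):
--         mult = s[i].lower()
--         if mult == 'm':
--             raw = raw * 100000000 // 1000
--         elif mult == 'u':
--             raw = raw * 100000000 // 1000000
--         elif mult == 'n':
--             raw = raw * 100000000 // 1000000000
--         elif mult == 'p':
--             raw = raw // 10000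
--     return raw
-- ===== SOURCE B (Python) =====
-- # Net effect of each suffix: a single (multiplier, divisor) pair, exact because
-- # raw >= 0 and 10**8//10**k reduces: m -> *100000, u -> *100, n -> //10, p -> //10000.
-- _SCALE = {'m': (100000, 1), 'u': (100, 1), 'n': (1, 10), 'p': (1, 10000)}
--
--
-- def _digits(s):
--     """(value, length) of the leading digit run, by recursion on the first char."""
--     if s and '0' <= s[0] <= '9':
--         v, n = _digits(s[1:])
--         return (ord(s[0]) - 48) * 10 ** n + v, n + 1
--     return 0, 0
--
--
-- def bolt11_parse_amount(s):
--     raw, n = _digits(s)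
--     if n == len(s):
--         return raw
--     mul, div = _SCALE.get(s[n].lower(), (1, 1))
--     return raw * mul // div
-- ===== Notes on version B (the rewrite author's own statement) =====
-- stated objective: alternative
-- what changed: Replaces A's imperative Horner accumulator loop and four-branch *10**8//10**k ladder by a pure recursion returning the (value, length) of the digit run built positionally from the tail, and a single reduced (multiplier, divisor) net-scale table applied once.
import Mathlib
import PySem

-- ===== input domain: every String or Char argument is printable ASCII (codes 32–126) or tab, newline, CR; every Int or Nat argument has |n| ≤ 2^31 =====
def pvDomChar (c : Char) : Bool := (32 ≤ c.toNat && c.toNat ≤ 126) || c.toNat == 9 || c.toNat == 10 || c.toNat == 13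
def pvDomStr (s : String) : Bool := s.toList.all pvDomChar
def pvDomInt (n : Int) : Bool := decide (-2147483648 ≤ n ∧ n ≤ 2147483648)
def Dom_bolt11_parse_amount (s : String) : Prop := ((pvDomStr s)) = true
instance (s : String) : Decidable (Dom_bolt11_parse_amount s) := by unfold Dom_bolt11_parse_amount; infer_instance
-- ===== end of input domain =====

-- B replaces A's Horner accumulator loop and *10**8//10**k branch ladder by a pure recursion
-- returning (value, length) of the digit run plus one reduced (mul, div) scale table (objective: alternative).

-- ===== PORT A =====
-- the while loop: scans leading digit chars accumulating raw (Horner), returns raw and the rest.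
-- int(s[i]) on a single digit char is its code point minus 48.
def pvAScan : List Char → Int → Int × List Char
  | [], raw => (raw, [])
  | c :: cs, raw =>
    if PySem.Chars.isdigit c then pvAScan cs (raw * 10 + ((c.toNat : Int) - 48))
    else (raw, c :: cs)

def bolt11_parse_amount (s : String) : Int :=
  if s.toList = [] then 0
  else
    match pvAScan s.toList 0 with
    | (raw, []) => raw
    | (raw, c :: _) =>
      let m := PySem.Chars.lowerChar c
      if m = 'm' then PySem.Int.floordiv (raw * 100000000) 1000
      else if m = 'u' then PySem.Int.floordiv (raw * 100000000) 1000000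
      else if m = 'n' then PySem.Int.floordiv (raw * 100000000) 1000000000
      else if m = 'p' then PySem.Int.floordiv raw 10000
      else raw

-- ===== PORT B =====
-- module-level dict _SCALE
def pvScale : PySem.Dict Char (Int × Int) :=
  PySem.Dict.ofList [('m', (100000, 1)), ('u', (100, 1)), ('n', (1, 10)), ('p', (1, 10000))]

-- _digits: (value, length) of the leading digit run, recursion on the first char
def pvBDigits : List Char → Int × Nat
  | [] => (0, 0)
  | c :: cs =>
    if '0' ≤ c ∧ c ≤ '9' then
      let p := pvBDigits cs
      (((c.toNat : Int) - 48) * 10 ^ p.2 + p.1, p.2 + 1)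
    else (0, 0)

def bolt11_parse_amount_alt (s : String) : Int :=
  let p := pvBDigits s.toList
  if p.2 = s.toList.length then p.1
  else
    match PySem.List.pyGet? s.toList (p.2 : Int) with
    | none => 0  -- unreachable: here p.2 < len(s), so s[p.2] never raises
    | some c =>
      let md := pvScale.getD (PySem.Chars.lowerChar c) (1, 1)
      PySem.Int.floordiv (p.1 * md.1) md.2

-- ===== PRECONDITION & SPEC =====
def Spec_bolt11_parse_amount (s : String) (out : Int) : Prop := out = bolt11_parse_amount_alt s
instance (s : String) (out : Int) : Decidable (Spec_bolt11_parse_amount s out) := by unfold Spec_bolt11_parse_amount; infer_instance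

-- ===== CLAIM (what is proved, stated in full; the proofs are below) =====
def Claim_equal_bolt11_parse_amount : Prop := ∀ (s : String), Dom_bolt11_parse_amount s → Spec_bolt11_parse_amount s (bolt11_parse_amount s)

-- ===== LEMMAS AND PROOFS =====

theorem pvBDigits_le (l : List Char) : (pvBDigits l).2 ≤ l.length := by
  induction l with
  | nil => simp [pvBDigits]
  | cons c cs ih =>
    simp only [pvBDigits, List.length_cons]
    split
    · omega
    · simp

-- A's scan in terms of B's recursion
theorem pvAScan_eq (l : List Char) : ∀ raw : Int,
    pvAScan l raw =
      (raw * 10 ^ (pvBDigits l).2 + (pvBDigits l).1, l.drop (pvBDigits l).2) := by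
  induction l with
  | nil => intro raw; simp [pvAScan, pvBDigits]
  | cons c cs ih =>
    intro raw
    have hdig : PySem.Chars.isdigit c = decide ('0' ≤ c ∧ c ≤ '9') := by
      simp [PySem.Chars.isdigit]
    by_cases h : '0' ≤ c ∧ c ≤ '9'
    · have hd : PySem.Chars.isdigit c = true := by rw [hdig]; exact decide_eq_true h
      have hB : pvBDigits (c :: cs)
          = (((c.toNat : Int) - 48) * 10 ^ (pvBDigits cs).2 + (pvBDigits cs).1,
             (pvBDigits cs).2 + 1) := by
        simp [pvBDigits, h]
      rw [show pvAScan (c :: cs) raw = pvAScan cs (raw * 10 + ((c.toNat : Int) - 48)) from by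
            simp [pvAScan, hd],
          ih, hB]
      simp only [List.drop_succ_cons, Prod.mk.injEq]
      exact ⟨by ring, trivial⟩
    · have hd : PySem.Chars.isdigit c = false := by rw [hdig]; exact decide_eq_false h
      have hB : pvBDigits (c :: cs) = (0, 0) := by simp [pvBDigits, h]
      simp [pvAScan, hd, hB]

theorem pvGetElem?_of_drop (l : List Char) (k : Nat) (c : Char) (rest : List Char)
    (h : l.drop k = c :: rest) : l[k]? = some c := by
  have h0 : (l.drop k)[0]? = some c := by simp [h]
  simpa [List.getElem?_drop] using h0

theorem pvMain (s : String) : bolt11_parse_amount s = bolt11_parse_amount_alt s := by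
  unfold bolt11_parse_amount bolt11_parse_amount_alt
  by_cases hnil : s.toList = []
  · simp [hnil, pvBDigits]
  · rw [if_neg hnil, pvAScan_eq s.toList 0]
    simp only [zero_mul, zero_add]
    set v := (pvBDigits s.toList).1 with hv
    set n := (pvBDigits s.toList).2 with hn
    cases hdrop : s.toList.drop n with
    | nil =>
      have hklen : s.toList.length ≤ n := by
        have := List.drop_eq_nil_iff.mp hdrop
        omega
      have heq : n = s.toList.length := le_antisymm (hn ▸ pvBDigits_le s.toList) hklen
      simp [heq]
    | cons c rest =>
      have hklt : n < s.toList.length := by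
        by_contra hge
        rw [List.drop_eq_nil_of_le (by omega)] at hdrop
        exact (List.cons_ne_nil c rest) hdrop.symm
      have hget : PySem.List.pyGet? s.toList (n : Int) = some c := by
        rw [PySem.List.pyGet?_natCast]
        exact pvGetElem?_of_drop _ _ _ _ hdrop
      rw [if_neg (by omega), hget]
      show (if PySem.Chars.lowerChar c = 'm' then PySem.Int.floordiv (v * 100000000) 1000
            else if PySem.Chars.lowerChar c = 'u' then PySem.Int.floordiv (v * 100000000) 1000000
            else if PySem.Chars.lowerChar c = 'n' then PySem.Int.floordiv (v * 100000000) 1000000000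
            else if PySem.Chars.lowerChar c = 'p' then PySem.Int.floordiv v 10000
            else v)
          = PySem.Int.floordiv (v * (pvScale.getD (PySem.Chars.lowerChar c) (1, 1)).1)
              (pvScale.getD (PySem.Chars.lowerChar c) (1, 1)).2
      by_cases h1 : PySem.Chars.lowerChar c = 'm'
      · rw [h1, show pvScale.getD 'm' (1, 1) = (100000, 1) from by decide, if_pos rfl]
        show PySem.Int.floordiv (v * 100000000) 1000 = PySem.Int.floordiv (v * 100000) 1
        rw [PySem.Int.floordiv_eq_ediv_of_pos (by norm_num),
            PySem.Int.floordiv_eq_ediv_of_pos (by norm_num)]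
        rw [show v * 100000000 = v * 100000 * 1000 by ring,
            Int.mul_ediv_cancel _ (by norm_num), Int.ediv_one]
      · by_cases h2 : PySem.Chars.lowerChar c = 'u'
        · rw [h2, show pvScale.getD 'u' (1, 1) = (100, 1) from by decide,
              if_neg (by decide), if_pos rfl]
          show PySem.Int.floordiv (v * 100000000) 1000000 = PySem.Int.floordiv (v * 100) 1
          rw [PySem.Int.floordiv_eq_ediv_of_pos (by norm_num),
              PySem.Int.floordiv_eq_ediv_of_pos (by norm_num)]
          rw [show v * 100000000 = v * 100 * 1000000 by ring,
              Int.mul_ediv_cancel _ (by norm_num), Int.ediv_one]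
        · by_cases h3 : PySem.Chars.lowerChar c = 'n'
          · rw [h3, show pvScale.getD 'n' (1, 1) = (1, 10) from by decide,
                if_neg (by decide), if_neg (by decide), if_pos rfl]
            show PySem.Int.floordiv (v * 100000000) 1000000000 = PySem.Int.floordiv (v * 1) 10
            rw [PySem.Int.floordiv_eq_ediv_of_pos (by norm_num),
                PySem.Int.floordiv_eq_ediv_of_pos (by norm_num)]
            rw [show v * 100000000 = 100000000 * v by ring,
                show (1000000000 : Int) = 100000000 * 10 by norm_num,
                Int.mul_ediv_mul_of_pos _ _ (by norm_num), mul_one]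
          · by_cases h4 : PySem.Chars.lowerChar c = 'p'
            · rw [h4, show pvScale.getD 'p' (1, 1) = (1, 10000) from by decide,
                  if_neg (by decide), if_neg (by decide), if_neg (by decide), if_pos rfl]
              show PySem.Int.floordiv v 10000 = PySem.Int.floordiv (v * 1) 10000
              rw [mul_one]
            · have hmk : pvScale = PySem.Dict.mk
                  [('m', (100000, 1)), ('u', (100, 1)), ('n', (1, 10)), ('p', (1, 10000))] := by
                decide
              have hd : pvScale.getD (PySem.Chars.lowerChar c) (1, 1) = (1, 1) := by
                simp [hmk, PySem.Dict.getD, PySem.Dict.get?, PySem.Dict.get?_mk_cons,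
                  Ne.symm h1, Ne.symm h2, Ne.symm h3, Ne.symm h4]
              rw [hd, if_neg h1, if_neg h2, if_neg h3, if_neg h4]
              show v = PySem.Int.floordiv (v * 1) 1
              rw [mul_one, PySem.Int.floordiv_eq_ediv_of_pos (by norm_num), Int.ediv_one]

-- ===== VERDICT (by name: the statement is the Claim_ definition above) =====
theorem bolt11_parse_amount_spec : Claim_equal_bolt11_parse_amount := by
  intro s _
  unfold Spec_bolt11_parse_amount
  exact pvMain s
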